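-- pv_equiv track=rewrite | github.com/vinicius342/AssistenteWhatsmenu | whatsapp.py | number_phone_formatting
-- ===== SOURCE A (Python) =====
-- def number_phone_formatting(phone_number: str):
--
--     phone_number_list = ['+', '55', ' ']
--     for i in range(len(phone_number)):
--         if i == 7:
--             phone_number_list.append('-')
--         elif i == 2:
--             phone_number_list.append(' ')
--             continue
--
--         phone_number_list.append(phone_number[i])
--
--     formatted_phone_number = ''
--     for n in phone_number_list:
--         formatted_phone_number = formatted_phone_number + n
--
--     return formatted_phone_number
-- ===== SOURCE B (Python) =====
-- def number_phone_formatting(phone_number: str):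
--     out = "+55 " + phone_number[:2]
--     if len(phone_number) > 2:
--         out += " " + phone_number[3:7]
--     if len(phone_number) > 7:
--         out += "-" + phone_number[7:]
--     return out
-- ===== Notes on version B (the rewrite author's own statement) =====
-- stated objective: simpler
-- what changed: Replaces the per-index loop building a list of one-character strings (plus a second quadratic concatenation loop) with three slice-based concatenations guarded by length thresholds.
import Mathlib
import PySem

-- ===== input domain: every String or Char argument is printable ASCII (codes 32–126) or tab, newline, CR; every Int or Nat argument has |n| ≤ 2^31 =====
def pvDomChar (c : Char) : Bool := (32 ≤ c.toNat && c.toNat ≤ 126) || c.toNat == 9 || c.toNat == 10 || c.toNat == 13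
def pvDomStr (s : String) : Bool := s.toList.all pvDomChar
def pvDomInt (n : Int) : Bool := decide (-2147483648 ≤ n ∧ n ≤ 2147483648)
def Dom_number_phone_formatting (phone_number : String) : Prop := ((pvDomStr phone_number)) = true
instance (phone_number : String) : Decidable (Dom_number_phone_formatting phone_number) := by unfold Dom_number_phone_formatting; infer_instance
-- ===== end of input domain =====

-- B replaces A's per-index loop (which builds a list of one-char strings then concatenates it
-- in a second loop) by three slice-based concatenations; objective: simpler.

-- ===== PORT A =====
-- the loop body: `if i == 7: append '-'` then (unless the elif i == 2 branch ran) append phone_number[i];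
-- `cs.getD i ' '` is exact for phone_number[i] here since every i from range(len) satisfies i < cs.length
def pvStepA (cs : List Char) (acc : List (List Char)) (i : Nat) : List (List Char) :=
  if i = 7 then (acc ++ [['-']]) ++ [[cs.getD i ' ']]
  else if i = 2 then acc ++ [[' ']]
  else acc ++ [[cs.getD i ' ']]

-- for i in range(len(phone_number)): range(n) over Nat indices 0..n-1, exactly List.range n
def pvLoopA (cs : List Char) : List (List Char) :=
  (List.range cs.length).foldl (pvStepA cs) [['+'], ['5','5'], [' ']]

def number_phone_formatting (phone_number : String) : String :=
  let cs := phone_number.toList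
  let phone_number_list := pvLoopA cs
  -- second loop: formatted_phone_number = formatted_phone_number + n
  String.mk (phone_number_list.foldl (fun s n => s ++ n) [])

-- ===== PORT B =====
def number_phone_formatting_alt (phone_number : String) : String :=
  let cs := phone_number.toList
  let out := "+55 ".toList ++ PySem.List.slice cs none (some 2)           -- "+55 " + phone_number[:2]
  let out := if cs.length > 2 then out ++ (' ' :: PySem.List.slice cs (some 3) (some 7)) else out
  let out := if cs.length > 7 then out ++ ('-' :: PySem.List.slice cs (some 7) none) else out
  String.mk out

-- ===== PRECONDITION & SPEC =====
def Spec_number_phone_formatting (phone_number : String) (out : String) : Prop := out = number_phone_formatting_alt phone_number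
instance (phone_number : String) (out : String) : Decidable (Spec_number_phone_formatting phone_number out) := by unfold Spec_number_phone_formatting; infer_instance

-- ===== CLAIM (what is proved, stated in full; the proofs are below) =====
def Claim_equal_number_phone_formatting : Prop := ∀ (phone_number : String), Dom_number_phone_formatting phone_number → Spec_number_phone_formatting phone_number (number_phone_formatting phone_number)

-- ===== LEMMAS AND PROOFS =====

lemma pv_foldl_append_flatten (l : List (List Char)) (init : List Char) :
    l.foldl (fun s n => s ++ n) init = init ++ l.flatten := by
  induction l generalizing init with
  | nil => simp
  | cons x xs ih => simp [List.foldl_cons, ih, List.append_assoc]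

-- closed form of A's loop, flattened
lemma pv_loopA_closed (cs : List Char) :
    (pvLoopA cs).flatten =
      '+' :: '5' :: '5' :: ' ' ::
        (cs.take 2
          ++ (if 2 < cs.length then ' ' :: (cs.drop 3).take 4 else [])
          ++ (if 7 < cs.length then '-' :: cs.drop 7 else [])) := by
  induction cs using List.reverseRecOn with
  | nil => simp [pvLoopA]
  | append_singleton cs c ih =>
    have hcong : (List.range cs.length).foldl (pvStepA (cs ++ [c])) [['+'], ['5','5'], [' ']]
        = (List.range cs.length).foldl (pvStepA cs) [['+'], ['5','5'], [' ']] := by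
      apply PySem.List.foldl_congr_mem
      intro acc i hi
      have hlt : i < cs.length := List.mem_range.mp hi
      simp [pvStepA, List.getD_eq_getElem?_getD, List.getElem?_append_left hlt]
    have hstep : pvLoopA (cs ++ [c]) = pvStepA (cs ++ [c]) (pvLoopA cs) cs.length := by
      simp only [pvLoopA, List.length_append, List.length_cons, List.length_nil,
        List.range_succ, List.foldl_append, List.foldl_cons, List.foldl_nil, hcong]
    have hget : (cs ++ [c]).getD cs.length ' ' = c := by
      simp [List.getD_eq_getElem?_getD]
    by_cases h7 : cs.length = 7
    · rw [hstep]
      have h1 : (cs ++ [c]).take 2 = cs.take 2 := List.take_append_of_le_length (by omega)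
      have h2 : ((cs ++ [c]).drop 3).take 4 = (cs.drop 3).take 4 := by
        rw [List.drop_append_of_le_length (by omega), List.take_append_of_le_length (by simp; omega)]
      have h3 : (cs ++ [c]).drop 7 = [c] := by
        rw [List.drop_append_of_le_length (by omega)]; simp [h7]
      simp [pvStepA, List.flatten_append, ih, h7, h1, h2, h3]
    · by_cases h2i : cs.length = 2
      · rw [hstep]
        have h1 : (cs ++ [c]).take 2 = cs.take 2 := List.take_append_of_le_length (by omega)
        have hdrop : (cs ++ [c]).drop 3 = [] := by
          rw [List.drop_eq_nil_iff.mpr]; simp [h2i]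
        simp [pvStepA, List.flatten_append, ih, h2i, h1, hdrop]
      · rw [hstep]
        simp only [pvStepA, if_neg h7, if_neg h2i, List.flatten_append, ih, hget]
        rcases Nat.lt_or_ge cs.length 2 with hl | hl
        · -- appended char lands in the take-2 prefix
          have h1 : (cs ++ [c]).take 2 = cs.take 2 ++ [c] := by
            have hc : List.take (2 - cs.length) [c] = [c] := List.take_of_length_le (by simp; omega)
            rw [List.take_append, hc]
          simp [h1, show ¬ 2 < cs.length from by omega, show ¬ 7 < cs.length from by omega,
                show ¬ 2 < cs.length + 1 from by omega, show ¬ 7 < cs.length + 1 from by omega]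
        · rcases Nat.lt_or_ge cs.length 7 with hm | hm
          · -- 3 ≤ len ≤ 6: appended char lands in the middle block
            have h1 : (cs ++ [c]).take 2 = cs.take 2 := List.take_append_of_le_length (by omega)
            have hmid : ((cs ++ [c]).drop 3).take 4 = (cs.drop 3).take 4 ++ [c] := by
              have hc : List.take (4 - (cs.drop 3).length) [c] = [c] :=
                List.take_of_length_le (by simp; omega)
              rw [List.drop_append_of_le_length (by omega), List.take_append, hc]
            simp [h1, hmid, show 2 < cs.length from by omega, show ¬ 7 < cs.length from by omega,
                  show 2 < cs.length + 1 from by omega, show ¬ 7 < cs.length + 1 from by omega]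
          · -- len ≥ 8: appended char lands in the tail block
            have h1 : (cs ++ [c]).take 2 = cs.take 2 := List.take_append_of_le_length (by omega)
            have hmid : ((cs ++ [c]).drop 3).take 4 = (cs.drop 3).take 4 := by
              rw [List.drop_append_of_le_length (by omega), List.take_append_of_le_length (by simp; omega)]
            have htail : (cs ++ [c]).drop 7 = cs.drop 7 ++ [c] :=
              List.drop_append_of_le_length (by omega)
            simp [h1, hmid, htail, show 2 < cs.length from by omega, show 7 < cs.length from by omega,
                  show 2 < cs.length + 1 from by omega, show 7 < cs.length + 1 from by omega]

-- ===== VERDICT (by name: the statement is the Claim_ definition above) =====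
theorem number_phone_formatting_spec : Claim_equal_number_phone_formatting := by
  intro s _
  unfold Spec_number_phone_formatting number_phone_formatting number_phone_formatting_alt
  simp only [pv_foldl_append_flatten, pv_loopA_closed]
  rw [show (some (2:Int)) = some ((2:Nat):Int) from rfl,
      show (some (3:Int)) = some ((3:Nat):Int) from rfl,
      show (some (7:Int)) = some ((7:Nat):Int) from rfl,
      PySem.List.slice_to_natCast, PySem.List.slice_natCast, PySem.List.slice_from_natCast]
  split_ifs with hA hB <;> simp [String.mk]
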